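-- pv_equiv track=rewrite | github.com/willizdev/compuba | Algoritmos/Introducción a la Programación/Python/Guías/Guía 10 - Integradora/p10.py | empleados_del_mes
-- ===== SOURCE A (Python) =====
-- def empleados_del_mes(horas: dict[int, list[int]]) -> list[int]:
--
--     def suma(l: list[int]) -> int:
--         s: int = 0
--         for i in l:
--             s += i
--         return s
--
--     res: list[int] = []
--     maximo: int = 0
--
--     for h in horas.values():
--         s: int = suma(h)
--         if s > maximo:
--             maximo = s
--
--     for empleado, tiempo in horas.items():
--         if suma(tiempo) == maximo:
--             res.append(empleado)
--
--     return res
-- ===== SOURCE B (Python) =====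
-- def empleados_del_mes(horas: dict[int, list[int]]) -> list[int]:
--     res: list[int] = []
--     maximo: int = 0
--     for empleado, tiempo in horas.items():
--         s = sum(tiempo)
--         if s > maximo:
--             maximo = s
--             res = [empleado]
--         elif s == maximo:
--             res.append(empleado)
--     return res
-- ===== Notes on version B (the rewrite author's own statement) =====
-- stated objective: alternative
-- what changed: Single fused pass over horas.items() maintaining the running maximum and the current argmax list (reset on a strictly greater sum), instead of one pass to find the maximum and a second pass to filter, with each pass re-summing the hour lists via a hand-written suma.
import Mathlib
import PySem

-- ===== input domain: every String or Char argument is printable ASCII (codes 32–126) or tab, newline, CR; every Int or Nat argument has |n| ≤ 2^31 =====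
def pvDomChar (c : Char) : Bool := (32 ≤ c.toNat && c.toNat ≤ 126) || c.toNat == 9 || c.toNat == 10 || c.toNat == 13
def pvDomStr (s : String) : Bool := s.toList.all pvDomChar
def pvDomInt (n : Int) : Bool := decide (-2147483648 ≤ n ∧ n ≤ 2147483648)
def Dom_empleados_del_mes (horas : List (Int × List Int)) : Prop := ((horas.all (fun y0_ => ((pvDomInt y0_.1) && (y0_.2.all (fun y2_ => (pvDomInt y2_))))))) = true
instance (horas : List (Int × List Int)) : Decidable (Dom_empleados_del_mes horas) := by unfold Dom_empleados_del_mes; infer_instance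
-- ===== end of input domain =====

-- B fuses A's two passes (max-finding, then filtering) into a single pass that
-- maintains the running maximum and the current argmax list. (objective: alternative)


-- ===== PORT A =====
-- A's inner helper `suma`: explicit accumulation loop
def sumaA (l : List Int) : Int := l.foldl (fun s i => s + i) 0

def empleados_del_mes (horas : List (Int × List Int)) : List Int :=
  -- first loop: maximo over horas.values()
  let maximo : Int :=
    horas.foldl (fun m h => let s := sumaA h.2; if s > m then s else m) 0
  -- second loop: collect employees whose sum equals maximo
  horas.foldl (fun res p => if sumaA p.2 = maximo then res ++ [p.1] else res) []

-- ===== PORT B =====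
-- single pass maintaining (maximo, res); `sum(tiempo)` ported as List.sum
def empleados_del_mes_alt (horas : List (Int × List Int)) : List Int :=
  (horas.foldl
    (fun (st : Int × List Int) p =>
      let s := p.2.sum
      if s > st.1 then (s, [p.1])
      else if s = st.1 then (st.1, st.2 ++ [p.1])
      else st)
    (0, [])).2

-- ===== PRECONDITION & SPEC =====
def Spec_empleados_del_mes (horas : List (Int × List Int)) (out : List Int) : Prop := out = empleados_del_mes_alt horas
instance (horas : List (Int × List Int)) (out : List Int) : Decidable (Spec_empleados_del_mes horas out) := by unfold Spec_empleados_del_mes; infer_instance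

-- ===== CLAIM (what is proved, stated in full; the proofs are below) =====
def Claim_equal_empleados_del_mes : Prop := ∀ (horas : List (Int × List Int)), Dom_empleados_del_mes horas → Spec_empleados_del_mes horas (empleados_del_mes horas)

-- ===== LEMMAS AND PROOFS =====

theorem sumaA_eq_sum (l : List Int) : sumaA l = l.sum := by
  rw [List.sum_eq_foldl]; rfl

-- abbreviations for the three loops (proof-local)
def maxF (horas : List (Int × List Int)) (m : Int) : Int :=
  horas.foldl (fun m h => let s := sumaA h.2; if s > m then s else m) m

def loopB (horas : List (Int × List Int)) (st : Int × List Int) : Int × List Int :=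
  horas.foldl
    (fun st p =>
      let s := p.2.sum
      if s > st.1 then (s, [p.1])
      else if s = st.1 then (st.1, st.2 ++ [p.1])
      else st) st

def filtmap (horas : List (Int × List Int)) (M : Int) : List Int :=
  (horas.filter (fun p => decide (sumaA p.2 = M))).map Prod.fst

theorem maxF_cons (p : Int × List Int) (t : List (Int × List Int)) (m : Int) :
    maxF (p :: t) m = maxF t (if sumaA p.2 > m then sumaA p.2 else m) := by
  simp [maxF, List.foldl]

theorem le_maxF (horas : List (Int × List Int)) (m : Int) : m ≤ maxF horas m := by
  induction horas generalizing m with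
  | nil => simp [maxF]
  | cons p t ih =>
    rw [maxF_cons]
    by_cases h : sumaA p.2 > m
    · simp only [if_pos h]; exact le_of_lt (lt_of_lt_of_le h (ih _))
    · simp only [if_neg h]; exact ih m

theorem foldA_eq_filtmap (horas : List (Int × List Int)) (acc : List Int) (M : Int) :
    horas.foldl (fun res p => if sumaA p.2 = M then res ++ [p.1] else res) acc
      = acc ++ filtmap horas M := by
  induction horas generalizing acc with
  | nil => simp [filtmap]
  | cons p t ih =>
    by_cases h : sumaA p.2 = M <;>
      simp [List.foldl, filtmap, List.filter, h, ih]

theorem loopB_char (horas : List (Int × List Int)) (m : Int) (res : List Int) :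
    (loopB horas (m, res)).2
      = (if maxF horas m = m then res else []) ++ filtmap horas (maxF horas m) := by
  induction horas generalizing m res with
  | nil => simp [loopB, maxF, filtmap]
  | cons p t ih =>
    rw [maxF_cons]
    have hs : p.2.sum = sumaA p.2 := (sumaA_eq_sum p.2).symm
    by_cases h1 : sumaA p.2 > m
    · simp only [if_pos h1]
      have hstep : loopB (p :: t) (m, res) = loopB t (sumaA p.2, [p.1]) := by
        simp [loopB, List.foldl, hs, h1]
      rw [hstep, ih]
      have hle : sumaA p.2 ≤ maxF t (sumaA p.2) := le_maxF t _
      have hne : maxF t (sumaA p.2) ≠ m := by omega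
      have hnm : sumaA p.2 ≠ m := by omega
      by_cases h2 : maxF t (sumaA p.2) = sumaA p.2
      · simp [filtmap, List.filter, h2, hnm]
      · have h3 : ¬ sumaA p.2 = maxF t (sumaA p.2) := fun h => h2 h.symm
        simp [filtmap, List.filter, h2, h3, hne]
    · simp only [if_neg h1]
      have hle : m ≤ maxF t m := le_maxF t m
      by_cases h2 : sumaA p.2 = m
      · have hstep : loopB (p :: t) (m, res) = loopB t (m, res ++ [p.1]) := by
          simp [loopB, List.foldl, hs, h1, h2]
        rw [hstep, ih]
        by_cases h3 : maxF t m = m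
        · simp [filtmap, List.filter, h2, h3]
        · have h4 : ¬ sumaA p.2 = maxF t m := by rw [h2]; exact fun h => h3 h.symm
          simp [filtmap, List.filter, h3, h4]
      · have hstep : loopB (p :: t) (m, res) = loopB t (m, res) := by
          simp [loopB, List.foldl, hs, h1, h2]
        rw [hstep, ih]
        have h4 : ¬ sumaA p.2 = maxF t m := by
          intro h; omega
        simp [filtmap, List.filter, h4]

-- ===== VERDICT (by name: the statement is the Claim_ definition above) =====
theorem empleados_del_mes_spec : Claim_equal_empleados_del_mes := by
  intro horas _
  show empleados_del_mes horas = empleados_del_mes_alt horas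
  have hA : empleados_del_mes horas = filtmap horas (maxF horas 0) := by
    simp only [empleados_del_mes]
    rw [foldA_eq_filtmap]
    rfl
  have hB : empleados_del_mes_alt horas = (loopB horas (0, [])).2 := rfl
  rw [hA, hB, loopB_char]
  by_cases h : maxF horas 0 = 0 <;> simp [h]
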